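-- pv_equiv track=rewrite | github.com/moghelab/ResinGlycoside | 2_rgAnnotation/resinGlycoside_id_step3_fragCounts.py | getPeakInfo
-- ===== SOURCE A (Python) =====
-- def getPeakInfo(list1,dictm):
--     justStarted=0
--     for item in list1:
--         annot=item.split('|')[-1]
--         if annot not in dictm:
--             dictm[annot]=1
--             justStarted=1
--         else:
--             if justStarted==0:
--                 dictm[annot]+=1
--     return dictm
-- ===== SOURCE B (Python) =====
-- def getPeakInfo(list1, dictm):
--     # Mutates dictm in place and returns it, like the original.
--     annots = [item.split('|')[-1] for item in list1]
--     # p = first position whose annotation is not already a key of dictm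
--     # (the original's justStarted flag flips exactly there: keys are unchanged before it).
--     p = 0
--     while p < len(annots) and annots[p] in dictm:
--         p += 1
--     # Phase 1: tally the prefix once, then add each total in a single update per key.
--     tally = {}
--     for a in annots[:p]:
--         tally[a] = tally.get(a, 0) + 1
--     for a, c in tally.items():
--         dictm[a] += c
--     # Phase 2: after the flag flips, only brand-new annotations are recorded, as 1.
--     for a in annots[p:]:
--         dictm.setdefault(a, 1)
--     return dictm
-- ===== Notes on version B (the rewrite author's own statement) =====
-- stated objective: alternative
-- what changed: The running justStarted flag is replaced by computing the split point p (first annotation not already a key), then two differently-shaped passes: a counter built over the prefix whose totals are added with one update per key, and a setdefault pass over the suffix.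
import Mathlib
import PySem

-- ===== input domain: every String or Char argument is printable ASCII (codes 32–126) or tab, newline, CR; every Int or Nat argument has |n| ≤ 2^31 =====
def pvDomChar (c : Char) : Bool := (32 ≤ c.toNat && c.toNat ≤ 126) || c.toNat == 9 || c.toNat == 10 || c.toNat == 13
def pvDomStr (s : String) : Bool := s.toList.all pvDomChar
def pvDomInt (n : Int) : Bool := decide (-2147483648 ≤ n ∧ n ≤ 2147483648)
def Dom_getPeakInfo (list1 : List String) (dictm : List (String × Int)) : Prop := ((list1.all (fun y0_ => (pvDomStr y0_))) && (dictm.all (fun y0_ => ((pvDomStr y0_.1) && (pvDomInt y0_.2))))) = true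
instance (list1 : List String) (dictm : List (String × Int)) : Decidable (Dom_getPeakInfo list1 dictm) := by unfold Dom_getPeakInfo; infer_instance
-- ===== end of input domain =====

-- B replaces A's running justStarted flag by the split point p (first annotation not already a
-- key) and two differently-shaped passes: a prefix counter added in one update per key, and a
-- setdefault pass over the suffix; same cost. Both Pythons mutate dictm in place and return it;
-- the equivalence proved is about the returned dict (B reaches the same final dict state).

-- ===== PORT A =====
-- item.split('|')[-1]: splitting by a nonempty separator never yields [], so [-1] never raises
-- and PySem.List.pyGet? is always some; .getD "" is exact here.
def pyAnnot (item : String) : String :=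
  (PySem.List.pyGet? ((PySem.Str.split? item "|").getD []) (-1)).getD ""

def getPeakInfo (list1 : List String) (dictm : List (String × Int)) : List (String × Int) :=
  (list1.foldl
    (fun (st : PySem.Dict String Int × Int) item =>
      let annot := pyAnnot item
      if st.1.contains annot = false then (st.1.insert annot 1, 1)
      else if st.2 = 0 then (st.1.modify annot 0 (· + 1), st.2)  -- dictm[annot] += 1 (key present)
      else st)
    (PySem.Dict.mk dictm, 0)).1.items

-- ===== PORT B =====
-- the `while p < len(annots) and annots[p] in dictm: p += 1` loop, structurally on the list
def prefLen (d : PySem.Dict String Int) : List String → Nat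
  | [] => 0
  | a :: rest => if d.contains a then prefLen d rest + 1 else 0

def getPeakInfo_alt (list1 : List String) (dictm : List (String × Int)) : List (String × Int) :=
  let d0 : PySem.Dict String Int := PySem.Dict.mk dictm
  let annots := list1.map pyAnnot
  let p := prefLen d0 annots
  let tally := (annots.take p).foldl
    (fun (t : PySem.Dict String Int) a => t.insert a (t.getD a 0 + 1)) PySem.Dict.empty
  -- dictm[a] += c : every tally key is a key of dictm, so getD reads the present value
  let d1 := tally.items.foldl (fun (d : PySem.Dict String Int) pc => d.insert pc.1 (d.getD pc.1 0 + pc.2)) d0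
  let d2 := (annots.drop p).foldl (fun (d : PySem.Dict String Int) a => d.setdefault a 1) d1
  d2.items

-- ===== PRECONDITION & SPEC =====
-- dictm models a Python dict, whose keys are unique; association lists with duplicated keys
-- correspond to no Python input, so they are excluded.
def Pre_getPeakInfo (list1 : List String) (dictm : List (String × Int)) : Prop :=
  (dictm.map Prod.fst).Nodup
instance (list1 : List String) (dictm : List (String × Int)) : Decidable (Pre_getPeakInfo list1 dictm) := by unfold Pre_getPeakInfo; infer_instance

def pvWitness_getPeakInfo : List String × (List (String × Int)) := (["a|x", "b"], [("x", 2)])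

def Spec_getPeakInfo (list1 : List String) (dictm : List (String × Int)) (out : List (String × Int)) : Prop := out = getPeakInfo_alt list1 dictm
instance (list1 : List String) (dictm : List (String × Int)) (out : List (String × Int)) : Decidable (Spec_getPeakInfo list1 dictm out) := by unfold Spec_getPeakInfo; infer_instance

-- ===== CLAIM (what is proved, stated in full; the proofs are below) =====
def Claim_equal_getPeakInfo : Prop := ∀ (list1 : List String) (dictm : List (String × Int)), Dom_getPeakInfo list1 dictm → Pre_getPeakInfo list1 dictm → Spec_getPeakInfo list1 dictm (getPeakInfo list1 dictm)

-- ===== LEMMAS AND PROOFS =====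

-- A's loop body with the annotation as the scanned element
def stepA (st : PySem.Dict String Int × Int) (a : String) : PySem.Dict String Int × Int :=
  if st.1.contains a = false then (st.1.insert a 1, 1)
  else if st.2 = 0 then (st.1.modify a 0 (· + 1), st.2)
  else st

lemma getPeakInfo_eq_annots (list1 : List String) (dictm : List (String × Int)) :
    getPeakInfo list1 dictm
      = ((list1.map pyAnnot).foldl stepA (PySem.Dict.mk dictm, 0)).1.items := by
  unfold getPeakInfo
  rw [List.foldl_map]
  rfl

lemma prefLen_congr (d d' : PySem.Dict String Int)
    (h : ∀ x, d.contains x = d'.contains x) (l : List String) :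
    prefLen d l = prefLen d' l := by
  induction l with
  | nil => rfl
  | cons a rest ih => simp [prefLen, h a, ih]

lemma take_prefLen_contains (d : PySem.Dict String Int) (l : List String) :
    ∀ a ∈ l.take (prefLen d l), d.contains a = true := by
  induction l with
  | nil => simp
  | cons b rest ih =>
    by_cases hc : d.contains b = true
    · simp only [prefLen, hc, if_true, List.take_succ_cons]
      intro a ha
      rw [List.mem_cons] at ha
      rcases ha with ha | ha
      · exact ha ▸ hc
      · exact ih a ha
    · simp [prefLen, hc]

-- after the flag flips, A's loop is exactly a setdefault loop
lemma foldl_stepA_one (l : List String) (d : PySem.Dict String Int) :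
    l.foldl stepA (d, 1) = (l.foldl (fun d a => PySem.Dict.setdefault d a 1) d, 1) := by
  induction l generalizing d with
  | nil => rfl
  | cons a rest ih =>
    by_cases hc : d.contains a = true
    · simp [stepA, hc, PySem.Dict.setdefault_of_contains _ _ hc, ih]
    · simp only [Bool.not_eq_true] at hc
      simp [stepA, hc, PySem.Dict.setdefault_of_not_contains _ _ hc, ih]

-- A's loop splits into an increment pass over the prefix and a setdefault pass over the suffix
lemma A_phases (l : List String) (d : PySem.Dict String Int) :
    (l.foldl stepA (d, 0)).1
      = (l.drop (prefLen d l)).foldl (fun d a => PySem.Dict.setdefault d a 1)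
          ((l.take (prefLen d l)).foldl (fun d a => PySem.Dict.modify d a 0 (· + 1)) d) := by
  induction l generalizing d with
  | nil => rfl
  | cons a rest ih =>
    by_cases hc : d.contains a = true
    · have hcongr : ∀ x, (PySem.Dict.modify d a 0 (· + 1)).contains x = d.contains x := by
        intro x
        rw [PySem.Dict.contains_modify]
        by_cases hx : (x == a) = true
        · simp [hx, (eq_of_beq hx) ▸ hc]
        · simp [hx]
      have hpl : prefLen d (a :: rest) = prefLen (PySem.Dict.modify d a 0 (· + 1)) rest + 1 := by
        simp only [prefLen, hc, if_true]
        rw [prefLen_congr _ _ (fun x => (hcongr x).symm) rest]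
      rw [hpl]
      simp only [List.take_succ_cons, List.drop_succ_cons, List.foldl_cons]
      have hstep : stepA (d, 0) a = (PySem.Dict.modify d a 0 (· + 1), 0) := by
        simp [stepA, hc]
      rw [hstep]
      exact ih _
    · simp only [Bool.not_eq_true] at hc
      have hpl : prefLen d (a :: rest) = 0 := by simp [prefLen, hc]
      rw [hpl]
      simp only [List.take_zero, List.drop_zero, List.foldl_nil, List.foldl_cons]
      have hstep : stepA (d, 0) a = (d.insert a 1, 1) := by simp [stepA, hc]
      rw [hstep, foldl_stepA_one, PySem.Dict.setdefault_of_not_contains _ _ hc]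

-- a fold of inserts over an items list with distinct keys adds that dict's value at every key
lemma getD_foldl_insert_items (l : List (String × Int)) (hnl : (l.map Prod.fst).Nodup)
    (d : PySem.Dict String Int) (v : String) :
    (l.foldl (fun (d : PySem.Dict String Int) pc => d.insert pc.1 (d.getD pc.1 0 + pc.2)) d).getD v 0
      = d.getD v 0 + (PySem.Dict.mk l).getD v 0 := by
  induction l generalizing d with
  | nil => simp [PySem.Dict.getD, PySem.Dict.get?]
  | cons pc rest ih =>
    obtain ⟨k0, v0⟩ := pc
    simp only [List.map_cons, List.nodup_cons] at hnl
    simp only [List.foldl_cons]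
    rw [ih hnl.2]
    by_cases hv : v = k0
    · subst hv
      rw [PySem.Dict.getD_insert_self]
      have h1 : (PySem.Dict.mk rest).getD v 0 = 0 := by
        apply PySem.Dict.getD_of_not_contains
        rw [PySem.Dict.contains_eq_decide_mem_keys]
        simp only [PySem.Dict.keys, decide_eq_false_iff_not]
        exact hnl.1
      have h2 : (PySem.Dict.mk ((v, v0) :: rest)).getD v 0 = v0 := by
        simp [PySem.Dict.getD_eq_get?_getD, PySem.Dict.get?_mk_cons]
      rw [h1, h2]; ring
    · rw [PySem.Dict.getD_insert_of_ne _ _ _ hv]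
      have h2 : (PySem.Dict.mk ((k0, v0) :: rest)).getD v 0 = (PySem.Dict.mk rest).getD v 0 := by
        have hne : (k0 == v) = false := by
          simp only [beq_eq_false_iff_ne]; exact fun h => hv h.symm
        simp [PySem.Dict.getD_eq_get?_getD, PySem.Dict.get?_mk_cons, hne]
      rw [h2]

-- updating a set with elements it already has leaves it unchanged
lemma update_keys_of_mem (s : List String) (l : List String) (h : ∀ x ∈ l, x ∈ s) :
    PySem.Set.update s l = s := by
  induction l with
  | nil => rfl
  | cons a rest ih =>
    have hadd : PySem.Set.add s a = s := by
      simp [PySem.Set.add, PySem.Set.contains, h a (by simp)]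
    simp only [PySem.Set.update, List.foldl_cons] at *
    rw [hadd]
    exact ih (fun x hx => h x (by simp [hx]))

-- the crux: adding the counter's totals in one insert per key equals incrementing item by item,
-- provided every counted key is already present
lemma bulk_add_eq_modify (pre : List String) (d : PySem.Dict String Int)
    (hnd : d.keys.Nodup) (hall : ∀ a ∈ pre, d.contains a = true) :
    (PySem.Dict.counter pre).items.foldl
        (fun (d : PySem.Dict String Int) pc => d.insert pc.1 (d.getD pc.1 0 + pc.2)) d
      = pre.foldl (fun d a => PySem.Dict.modify d a 0 (· + 1)) d := by
  have hmemkeys : ∀ x ∈ (PySem.Dict.counter pre).keys, x ∈ d.keys := by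
    intro x hx
    rw [PySem.Dict.keys_counter, PySem.Set.mem_ofList] at hx
    exact (PySem.Dict.contains_iff_mem_keys d x).mp (hall x hx)
  have hkeysL : ((PySem.Dict.counter pre).items.foldl
      (fun (d : PySem.Dict String Int) pc => d.insert pc.1 (d.getD pc.1 0 + pc.2)) d).keys = d.keys := by
    rw [PySem.Dict.keys_foldl_insert_key _ Prod.fst (fun d pc => d.getD pc.1 0 + pc.2)]
    exact update_keys_of_mem _ _ (fun x hx => hmemkeys x hx)
  have hkeysR : (pre.foldl (fun d a => PySem.Dict.modify d a 0 (· + 1)) d).keys = d.keys := by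
    rw [PySem.Dict.keys_foldl_modify pre 0 (fun _ _ v => v + 1)]
    exact update_keys_of_mem _ _ (fun x hx =>
      (PySem.Dict.contains_iff_mem_keys d x).mp (hall x hx))
  apply PySem.Dict.ext
  have hndL : ((PySem.Dict.counter pre).items.foldl
      (fun (d : PySem.Dict String Int) pc => d.insert pc.1 (d.getD pc.1 0 + pc.2)) d).keys.Nodup := by
    rw [hkeysL]; exact hnd
  have hndR : (pre.foldl (fun d a => PySem.Dict.modify d a 0 (· + 1)) d).keys.Nodup := by
    rw [hkeysR]; exact hnd
  have eL := PySem.Dict.items_eq_map_keys _ hndL 0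
  have eR := PySem.Dict.items_eq_map_keys _ hndR 0
  rw [eL, eR, hkeysL, hkeysR]
  apply List.map_congr_left
  intro k _
  have hL := getD_foldl_insert_items (PySem.Dict.counter pre).items
    (by simpa [PySem.Dict.keys] using PySem.Dict.nodup_keys_counter pre) d k
  rw [hL]
  have : PySem.Dict.mk (PySem.Dict.counter pre).items = PySem.Dict.counter pre := rfl
  rw [this, PySem.Dict.getD_counter, PySem.Dict.getD_foldl_modify_add_one]

-- ===== VERDICT (by name: the statement is the Claim_ definition above) =====
theorem getPeakInfo_spec : Claim_equal_getPeakInfo := by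
  intro list1 dictm _hdom hpre
  unfold Spec_getPeakInfo getPeakInfo_alt
  rw [getPeakInfo_eq_annots, A_phases]
  congr 1
  rw [PySem.Dict.foldl_insert_getD_add_one_eq_counter]
  rw [bulk_add_eq_modify]
  · simpa [PySem.Dict.keys] using hpre
  · exact take_prefLen_contains _ _
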